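-- pv_equiv track=rewrite | github.com/lmquan2005/Skoban-solver | deadlock.py | _is_continuous_line
-- ===== SOURCE A (Python) =====
-- def _is_continuous_line(positions: list, horizontal: bool) -> bool:
--     if len(positions) < 2:
--         return False
--
--     if horizontal:
--         # Sort by column
--         positions = sorted(positions, key=lambda p: p[1])
--         # Check continuity
--         for i in range(len(positions) - 1):
--             if positions[i+1][1] - positions[i][1] > 1:
--                 return False
--     else:
--         # Sort by row
--         positions = sorted(positions, key=lambda p: p[0])
--         # Check continuity
--         for i in range(len(positions) - 1):
--             if positions[i+1][0] - positions[i][0] > 1: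
--                 return False
--
--     return True
-- ===== SOURCE B (Python) =====
-- def _is_continuous_line(positions: list, horizontal: bool) -> bool:
--     if len(positions) < 2:
--         return False
--     coords = {p[1] if horizontal else p[0] for p in positions}
--     return max(coords) - min(coords) == len(coords) - 1
-- ===== Notes on version B (the rewrite author's own statement) =====
-- stated objective: simpler
-- what changed: Replaces sort-then-adjacent-gap-scan with a single set reduction: the distinct coordinates form a contiguous range iff max - min == count - 1.
import Mathlib
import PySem

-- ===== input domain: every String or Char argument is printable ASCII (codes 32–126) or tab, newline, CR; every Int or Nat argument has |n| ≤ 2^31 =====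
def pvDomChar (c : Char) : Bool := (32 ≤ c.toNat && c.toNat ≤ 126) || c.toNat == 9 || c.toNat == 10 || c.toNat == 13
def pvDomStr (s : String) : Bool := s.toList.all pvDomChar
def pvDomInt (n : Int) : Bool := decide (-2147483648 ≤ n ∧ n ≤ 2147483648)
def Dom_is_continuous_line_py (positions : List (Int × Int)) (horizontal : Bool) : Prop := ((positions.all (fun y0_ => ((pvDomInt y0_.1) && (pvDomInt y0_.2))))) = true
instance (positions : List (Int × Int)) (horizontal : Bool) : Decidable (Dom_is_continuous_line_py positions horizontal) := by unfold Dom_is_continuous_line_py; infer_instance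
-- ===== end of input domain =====

-- B replaces A's sort + adjacent-gap scan by one set reduction: max(coords) - min(coords) == len(coords) - 1.

-- ===== PORT A =====
-- the 'for i in range(len(positions)-1): if positions[i+1][k]-positions[i][k] > 1: return False' loop,
-- walked as the same sequence of adjacent pairs
def pvChk (proj : Int × Int → Int) : List (Int × Int) → Bool
  | a :: b :: t => if proj b - proj a > 1 then false else pvChk proj (b :: t)
  | _ => true

def is_continuous_line_py (positions : List (Int × Int)) (horizontal : Bool) : Bool :=
  if positions.length < 2 then false
  else if horizontal then
    pvChk (fun p => p.2) (PySem.List.sorted positions (fun p => p.2) false)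
  else
    pvChk (fun p => p.1) (PySem.List.sorted positions (fun p => p.1) false)

-- ===== PORT B =====
def is_continuous_line_py_alt (positions : List (Int × Int)) (horizontal : Bool) : Bool :=
  if positions.length < 2 then false
  else
    let coords : PySem.Set Int :=
      PySem.Set.ofList (positions.map (fun p => if horizontal then p.2 else p.1))
    -- max(coords) - min(coords) == len(coords) - 1 ; coords is nonempty here, so the raise-case never fires
    match PySem.List.max? coords (fun x => x), PySem.List.min? coords (fun x => x) with
    | some M, some m => decide (M - m = (coords.length : Int) - 1)
    | _, _ => false

-- ===== PRECONDITION & SPEC =====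
def Spec_is_continuous_line_py (positions : List (Int × Int)) (horizontal : Bool) (out : Bool) : Prop := out = is_continuous_line_py_alt positions horizontal
instance (positions : List (Int × Int)) (horizontal : Bool) (out : Bool) : Decidable (Spec_is_continuous_line_py positions horizontal out) := by unfold Spec_is_continuous_line_py; infer_instance

-- ===== CLAIM (what is proved, stated in full; the proofs are below) =====
def Claim_equal_is_continuous_line_py : Prop := ∀ (positions : List (Int × Int)) (horizontal : Bool), Dom_is_continuous_line_py positions horizontal → Spec_is_continuous_line_py positions horizontal (is_continuous_line_py positions horizontal)

-- ===== LEMMAS AND PROOFS =====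

-- A's adjacent-gap check on the projected coordinates
def pvChkI : List Int → Bool
  | a :: b :: t => if b - a > 1 then false else pvChkI (b :: t)
  | _ => true

lemma pvChk_map (proj : Int × Int → Int) : ∀ l : List (Int × Int), pvChk proj l = pvChkI (l.map proj)
  | [] => rfl
  | [_] => rfl
  | a :: b :: t => by
    simp only [pvChk, pvChkI, List.map]
    by_cases h : proj b - proj a > 1 <;> simp [h, pvChk_map proj (b :: t)]

-- if the sorted chain has all adjacent gaps ≤ 1, every integer between the head and any upper bound in the list occurs
lemma pv_fwd : ∀ (l : List Int) (a : Int), (a :: l).Pairwise (· ≤ ·) → pvChkI (a :: l) = true →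
    ∀ (M x : Int), M ∈ a :: l → a ≤ x → x ≤ M → x ∈ a :: l := by
  intro l
  induction l with
  | nil =>
    intro a _ _ M x hM hax hxM
    simp only [List.mem_singleton] at hM; subst hM
    simp; omega
  | cons b t ih =>
    intro a hp hchk M x hM hax hxM
    have hab : a ≤ b := (List.pairwise_cons.mp hp).1 b (by simp)
    have hgap : ¬ (b - a > 1) := by
      by_contra h; simp [pvChkI, h] at hchk
    have hchk' : pvChkI (b :: t) = true := by
      simpa [pvChkI, hgap] using hchk
    have hp' : (b :: t).Pairwise (· ≤ ·) := (List.pairwise_cons.mp hp).2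
    by_cases hxb : x < b
    · have : x = a := by omega
      simp [this]
    · -- b ≤ x; recurse into the tail
      have hM' : M ∈ b :: t := by
        rcases List.mem_cons.mp hM with h | h
        · -- M = a: then b ≤ M = a ≤ b forces b = a = M
          have hbM : b ≤ M := by omega
          have : M = b := by omega
          simp [this]
        · exact h
      have := ih b hp' hchk' M x hM' (by omega) hxM
      exact List.mem_cons_of_mem a this

-- if some adjacent gap exceeds 1 in the sorted chain, an integer ≥ head and ≤ some list element is missing
lemma pv_bwd : ∀ (l : List Int) (a : Int), (a :: l).Pairwise (· ≤ ·) → pvChkI (a :: l) = false →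
    ∃ x, x ∉ a :: l ∧ a ≤ x ∧ ∃ y ∈ a :: l, x ≤ y := by
  intro l
  induction l with
  | nil => intro a _ hchk; simp [pvChkI] at hchk
  | cons b t ih =>
    intro a hp hchk
    have hab : a ≤ b := (List.pairwise_cons.mp hp).1 b (by simp)
    have hp' : (b :: t).Pairwise (· ≤ ·) := (List.pairwise_cons.mp hp).2
    by_cases hgap : b - a > 1
    · refine ⟨a + 1, ?_, by omega, b, by simp, by omega⟩
      intro hmem
      rcases List.mem_cons.mp hmem with h | h
      · omega
      · rcases List.mem_cons.mp h with h' | h'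
        · omega
        · have : b ≤ a + 1 := (List.pairwise_cons.mp hp').1 _ h'
          omega
    · have hchk' : pvChkI (b :: t) = false := by
        simpa [pvChkI, hgap] using hchk
      obtain ⟨x, hxmem, hbx, y, hy, hxy⟩ := ih b hp' hchk'
      refine ⟨x, ?_, by omega, y, List.mem_cons_of_mem a hy, hxy⟩
      intro hmem
      rcases List.mem_cons.mp hmem with h | h
      · have hxb : x = b := by omega
        exact hxmem (hxb ▸ List.mem_cons_self)
      · exact hxmem h

-- the heart: on a nonempty sorted chain, the adjacent-gap check equals the max-min-count formula
lemma pv_key (cs : List Int) (hne : cs ≠ []) (hs : cs.Pairwise (· ≤ ·))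
    (m M : Int) (hm : m ∈ cs) (hmle : ∀ y ∈ cs, m ≤ y)
    (hM : M ∈ cs) (hMge : ∀ y ∈ cs, y ≤ M) :
    pvChkI cs = decide (M - m = (cs.toFinset.card : Int) - 1) := by
  obtain ⟨a, l, rfl⟩ := List.exists_cons_of_ne_nil hne
  have ham : a = m := by
    have h1 : m ≤ a := hmle a (by simp)
    have h2 : a ≤ m := by
      rcases List.mem_cons.mp hm with h | h
      · omega
      · exact (List.pairwise_cons.mp hs).1 m h
    omega
  have hmM : m ≤ M := hmle M hM
  have hsub : (a :: l).toFinset ⊆ Finset.Icc m M := by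
    intro x hx
    have hx' : x ∈ a :: l := List.mem_toFinset.mp hx
    exact Finset.mem_Icc.mpr ⟨hmle x hx', hMge x hx'⟩
  cases hb : pvChkI (a :: l) with
  | true =>
    have hicc : Finset.Icc m M ⊆ (a :: l).toFinset := by
      intro x hx
      obtain ⟨h1, h2⟩ := Finset.mem_Icc.mp hx
      exact List.mem_toFinset.mpr (pv_fwd l a hs hb M x hM (by omega) h2)
    have heq : (a :: l).toFinset = Finset.Icc m M := Finset.Subset.antisymm hsub hicc
    have hcard : ((a :: l).toFinset.card : Int) = M + 1 - m := by
      rw [heq, Int.card_Icc]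
      exact Int.toNat_of_nonneg (by omega)
    exact (decide_eq_true (by omega : M - m = ((a :: l).toFinset.card : Int) - 1)).symm
  | false =>
    obtain ⟨x, hxmem, hax, y, hy, hxy⟩ := pv_bwd l a hs hb
    have hlt : (a :: l).toFinset.card < (Finset.Icc m M).card := by
      apply Finset.card_lt_card
      rw [Finset.ssubset_iff_of_subset hsub]
      exact ⟨x, Finset.mem_Icc.mpr ⟨by omega, le_trans hxy (hMge y hy)⟩,
        fun h => hxmem (List.mem_toFinset.mp h)⟩
    have hcard : ((a :: l).toFinset.card : Int) < M + 1 - m := by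
      have := hlt
      rw [Int.card_Icc] at this
      have h2 : ((M + 1 - m).toNat : Int) = M + 1 - m := Int.toNat_of_nonneg (by omega)
      omega
    exact (decide_eq_false (by omega : ¬ M - m = ((a :: l).toFinset.card : Int) - 1)).symm

-- one symmetric branch, for either projection
lemma pv_main (positions : List (Int × Int)) (proj : Int × Int → Int)
    (hlen : 2 ≤ positions.length) :
    pvChk proj (PySem.List.sorted positions proj false) =
      (match PySem.List.max? (PySem.Set.ofList (positions.map proj)) (fun x => x),
             PySem.List.min? (PySem.Set.ofList (positions.map proj)) (fun x => x) with
       | some M, some m => decide (M - m = ((PySem.Set.ofList (positions.map proj)).length : Int) - 1)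
       | _, _ => false) := by
  set vs := positions.map proj with hvs
  set S := PySem.Set.ofList vs with hS
  have hvslen : vs.length = positions.length := by simp [hvs]
  have hvsne : vs ≠ [] := by
    intro h
    rw [h] at hvslen
    simp at hvslen
    omega
  obtain ⟨v0, vt, hv0⟩ := List.exists_cons_of_ne_nil hvsne
  have hSne : S ≠ [] := by
    intro h
    have : v0 ∈ S := (PySem.Set.mem_ofList vs v0).mpr (by simp [hv0])
    simp [h] at this
  obtain ⟨M, hmax⟩ := Option.ne_none_iff_exists'.mp
    (fun h => hSne ((PySem.List.max?_eq_none_iff S (fun x => x)).mp h))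
  obtain ⟨m, hmin⟩ := Option.ne_none_iff_exists'.mp
    (fun h => hSne ((PySem.List.min?_eq_none_iff S (fun x => x)).mp h))
  rw [hmax, hmin]
  -- transfer extremal facts from S to the sorted, projected chain cs
  set ws := PySem.List.sorted positions proj false with hws
  set cs := ws.map proj with hcs
  have hperm : cs.Perm vs := (PySem.List.sorted_perm positions proj false).map proj
  have hmemS : ∀ x : Int, x ∈ cs ↔ x ∈ S := by
    intro x
    rw [hperm.mem_iff, PySem.Set.mem_ofList]
  have hcsne : cs ≠ [] := by
    intro h
    have hp2 := hperm
    rw [h] at hp2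
    exact hvsne hp2.symm.eq_nil
  have hpair : cs.Pairwise (· ≤ ·) := by
    rw [hcs, List.pairwise_map]
    exact PySem.List.sorted_pairwise positions proj
  have hMmem : M ∈ cs := (hmemS M).mpr (PySem.List.max?_mem hmax)
  have hMge : ∀ y ∈ cs, y ≤ M := fun y hy => by
    simpa using PySem.List.max?_isMax hmax y ((hmemS y).mp hy)
  have hmmem : m ∈ cs := (hmemS m).mpr (PySem.List.min?_mem hmin)
  have hmle : ∀ y ∈ cs, m ≤ y := fun y hy => by
    simpa using PySem.List.min?_isMin hmin y ((hmemS y).mp hy)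
  have hcard : S.length = cs.toFinset.card := by
    have hnd : S.Nodup := PySem.Set.nodup_ofList vs
    have : S.toFinset = cs.toFinset := by
      ext x
      simp only [List.mem_toFinset]
      exact (hmemS x).symm
    rw [← this, List.toFinset_card_of_nodup hnd]
  rw [pvChk_map proj ws, ← hcs, pv_key cs hcsne hpair m M hmmem hmle hMmem hMge, hcard]

-- ===== VERDICT (by name: the statement is the Claim_ definition above) =====
theorem is_continuous_line_py_spec : Claim_equal_is_continuous_line_py := by
  intro positions horizontal _
  unfold Spec_is_continuous_line_py is_continuous_line_py is_continuous_line_py_alt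
  by_cases hlen : positions.length < 2
  · simp [hlen]
  · cases horizontal with
    | true => simpa [hlen] using pv_main positions (fun p => p.2) (by omega)
    | false => simpa [hlen] using pv_main positions (fun p => p.1) (by omega)
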